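-- pv_equiv track=rewrite | github.com/AdrianoTosetto/Formal-Languages-and-Compilers-INE5421 | T2/context_free_grammar.py | parse_sentential_form
-- ===== SOURCE A (Python) =====
-- def parse_sentential_form(sententialForm):
-- 	symbols = [] #the list to be returned
-- 	symbol = '' #an individual symbol to add to the list
-- 	for character in sententialForm:
-- 		if character != ' ':
-- 			symbol += character
-- 		elif len(symbol) > 0:
-- 			symbols.append(symbol)
-- 			symbol = ""
-- 	if len(symbol) > 0:
-- 		symbols.append(symbol)
-- 	return symbols
-- ===== SOURCE B (Python) =====
-- def parse_sentential_form(sententialForm):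
--     return [s for s in sententialForm.split(' ') if s]
-- ===== Notes on version B (the rewrite author's own statement) =====
-- stated objective: idiomatic
-- what changed: Replaces the character-by-character accumulation loop with a split-then-filter decomposition: split on the single space character and drop the empty segments.
import Mathlib
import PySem

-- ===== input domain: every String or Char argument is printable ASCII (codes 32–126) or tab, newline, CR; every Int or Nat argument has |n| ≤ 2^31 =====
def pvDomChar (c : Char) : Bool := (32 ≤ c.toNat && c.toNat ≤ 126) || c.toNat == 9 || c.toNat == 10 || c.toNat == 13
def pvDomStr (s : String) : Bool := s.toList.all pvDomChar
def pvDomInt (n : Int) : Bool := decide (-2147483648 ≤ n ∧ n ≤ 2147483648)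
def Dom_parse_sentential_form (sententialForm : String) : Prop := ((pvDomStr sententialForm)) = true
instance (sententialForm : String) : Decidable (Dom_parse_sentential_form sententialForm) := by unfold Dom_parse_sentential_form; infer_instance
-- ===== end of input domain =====

-- B replaces A's character-accumulation loop with split-on-space then filter-out-empties; return values proved equal.
-- ===== PORT A =====
-- state: (symbols, symbol); the Python string `symbol` is carried as its list of characters
-- (symbol += character ≙ list append, symbols.append(symbol) ≙ append String.ofList symbol)
def parse_sentential_form (sententialForm : String) : List String :=
  let r := sententialForm.toList.foldl
    (fun (st : List String × List Char) character =>
      if character ≠ ' ' then (st.1, st.2 ++ [character])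
      else if st.2.length > 0 then (st.1 ++ [String.ofList st.2], [])
      else st)
    ([], [])
  if r.2.length > 0 then r.1 ++ [String.ofList r.2] else r.1

-- ===== PORT B =====
-- sententialForm.split(' ') with the literal nonempty separator ≙ PySem.Chars.splitOn on the
-- character lists (exact); `if s` keeps exactly the nonempty segments
def parse_sentential_form_alt (sententialForm : String) : List String :=
  (((PySem.Chars.splitOn sententialForm.toList [' ']).map String.ofList).filter (fun t => t ≠ ""))

-- ===== PRECONDITION & SPEC =====
def Spec_parse_sentential_form (sententialForm : String) (out : List String) : Prop := out = parse_sentential_form_alt sententialForm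
instance (sententialForm : String) (out : List String) : Decidable (Spec_parse_sentential_form sententialForm out) := by unfold Spec_parse_sentential_form; infer_instance

-- ===== CLAIM (what is proved, stated in full; the proofs are below) =====
def Claim_equal_parse_sentential_form : Prop := ∀ (sententialForm : String), Dom_parse_sentential_form sententialForm → Spec_parse_sentential_form sententialForm (parse_sentential_form sententialForm)

-- ===== LEMMAS AND PROOFS =====

-- reference recursion: the list of segments of l split at ' ', with cur the pending prefix
def pvSp (cur : List Char) : List Char → List (List Char)
  | [] => [cur]
  | c :: rest => if c = ' ' then cur :: pvSp [] rest else pvSp (cur ++ [c]) rest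

lemma pv_go_eq (l : List Char) : ∀ (fuel : Nat) (cur : List Char) (hacc : List (List Char)),
    l.length ≤ fuel →
    PySem.Chars.splitOn.go [' '] fuel l cur hacc = hacc.reverse ++ pvSp cur.reverse l := by
  induction l with
  | nil =>
    intro fuel cur hacc h
    cases fuel <;> simp [PySem.Chars.splitOn.go, pvSp]
  | cons c rest ih =>
    intro fuel cur hacc h
    cases fuel with
    | zero => simp at h
    | succ f =>
      have hf : rest.length ≤ f := by simpa using h
      simp only [PySem.Chars.splitOn.go, List.isPrefixOf, Bool.and_true]
      by_cases hc : c = ' '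
      · subst hc
        simp only [beq_self_eq_true, if_true, List.length_singleton, List.drop_succ_cons,
          List.drop_zero, List.drop]
        rw [ih f [] (cur.reverse :: hacc) hf]
        simp [pvSp]
      · have : (' ' == c) = false := by simpa using fun h => hc h.symm
        rw [this]
        simp only [Bool.false_eq_true, if_false]
        rw [ih f (c :: cur) hacc hf]
        simp [pvSp, hc]

lemma pv_splitOn_eq (l : List Char) :
    PySem.Chars.splitOn l [' '] = pvSp [] l := by
  have := pv_go_eq l (l.length + 1) [] [] (by omega)
  simpa [PySem.Chars.splitOn] using this

lemma pv_foldA (l : List Char) : ∀ (syms : List String) (sym : List Char),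
    (let r := l.foldl
        (fun (st : List String × List Char) character =>
          if character ≠ ' ' then (st.1, st.2 ++ [character])
          else if st.2.length > 0 then (st.1 ++ [String.ofList st.2], [])
          else st)
        (syms, sym)
     if r.2.length > 0 then r.1 ++ [String.ofList r.2] else r.1)
    = syms ++ ((pvSp sym l).map String.ofList).filter (fun t => t ≠ "") := by
  induction l with
  | nil =>
    intro syms sym
    simp only [List.foldl_nil, pvSp, List.map, List.filter]
    by_cases hs : sym = []
    · subst hs; simp
    · simp [String.ofList_eq_empty_iff, hs, List.length_pos_iff]
  | cons c rest ih =>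
    intro syms sym
    by_cases hc : c = ' '
    · subst hc
      simp only [List.foldl_cons, ne_eq, not_true_eq_false, if_false, pvSp, if_pos rfl,
        List.map_cons, List.filter_cons]
      by_cases hs : sym = []
      · subst hs
        simpa [String.ofList_eq_empty_iff] using ih syms []
      · have hlen : 0 < sym.length := List.length_pos_iff.mpr hs
        simp only [hlen, if_pos]
        rw [ih (syms ++ [String.ofList sym]) []]
        simp [String.ofList_eq_empty_iff, hs]
    · simp only [List.foldl_cons, ne_eq, hc, not_false_eq_true, if_pos, pvSp, if_neg hc]
      exact ih syms (sym ++ [c])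

-- ===== VERDICT (by name: the statement is the Claim_ definition above) =====
theorem parse_sentential_form_spec : Claim_equal_parse_sentential_form := by
  intro s _
  unfold Spec_parse_sentential_form parse_sentential_form parse_sentential_form_alt
  rw [pv_splitOn_eq]
  simpa using pv_foldA s.toList [] []
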